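-- pv_equiv track=rewrite | github.com/Bakatora000/tolabot | homegraph/context.py | build_text_block
-- ===== SOURCE A (Python) =====
-- TEXT_BLOCK_HARD_LIMIT = 900
--
-- def build_text_block(
--     summary_short: str,
--     facts_high_confidence: list[str],
--     recent_relevant: list[str],
--     uncertain_points: list[str],
-- ) -> str:
--     content_lines: list[str] = []
--     if summary_short and summary_short != "aucun":
--         content_lines.append(f"- {summary_short}")
--     for item in facts_high_confidence:
--         content_lines.append(f"- {item}")
--     for item in recent_relevant:
--         content_lines.append(f"- {item}")
--     for item in uncertain_points:
--         content_lines.append(f"- incertain : {item}")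
--
--     if not content_lines:
--         return ""
--
--     text = "\n".join(["Contexte viewer:", *content_lines])
--     if len(text) <= TEXT_BLOCK_HARD_LIMIT:
--         return text
--
--     recent_copy = recent_relevant.copy()
--     uncertain_copy = uncertain_points.copy()
--     facts_copy = facts_high_confidence.copy()
--
--     while recent_copy and len(text) > TEXT_BLOCK_HARD_LIMIT:
--         recent_copy.pop()
--         text = build_text_block(summary_short, facts_copy, recent_copy, uncertain_copy)
--     while uncertain_copy and len(text) > TEXT_BLOCK_HARD_LIMIT:
--         uncertain_copy.pop()
--         text = build_text_block(summary_short, facts_copy, recent_copy, uncertain_copy)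
--     while len(facts_copy) > 2 and len(text) > TEXT_BLOCK_HARD_LIMIT:
--         facts_copy.pop()
--         text = build_text_block(summary_short, facts_copy, recent_copy, uncertain_copy)
--     return text[:TEXT_BLOCK_HARD_LIMIT]
-- ===== SOURCE B (Python) =====
-- TEXT_BLOCK_HARD_LIMIT = 900
--
--
-- def _trim(pre, other, lo, k):
--     # decrement k while above lo and the kept-prefix total still exceeds the limit
--     while lo < k and other + pre[k] > TEXT_BLOCK_HARD_LIMIT:
--         k -= 1
--     return k
--
--
-- def build_text_block(summary_short, facts_high_confidence, recent_relevant, uncertain_points):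
--     head = ["- " + summary_short] if summary_short and summary_short != "aucun" else []
--     facts = ["- " + x for x in facts_high_confidence]
--     recent = ["- " + x for x in recent_relevant]
--     unc = ["- incertain : " + x for x in uncertain_points]
--     if not head and not facts and not recent and not unc:
--         return ""
--     # length bookkeeping: header is 16 chars, each kept line costs "\n" + line
--     base = len("Contexte viewer:") + sum(len(l) + 1 for l in head)
--     fpre = [0]
--     for l in facts:
--         fpre.append(fpre[-1] + len(l) + 1)
--     rpre = [0]
--     for l in recent:
--         rpre.append(rpre[-1] + len(l) + 1)
--     upre = [0]
--     for l in unc: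
--         upre.append(upre[-1] + len(l) + 1)
--     kF, kR, kU = len(facts), len(recent), len(unc)
--     if base + fpre[kF] + rpre[kR] + upre[kU] > TEXT_BLOCK_HARD_LIMIT:
--         kR = _trim(rpre, base + fpre[kF] + upre[kU], 0, kR)
--         kU = _trim(upre, base + fpre[kF] + rpre[kR], 0, kU)
--         kF = _trim(fpre, base + rpre[kR] + upre[kU], 2, kF)
--     lines = head + facts[:kF] + recent[:kR] + unc[:kU]
--     if not lines:
--         return ""
--     return "\n".join(["Contexte viewer:", *lines])[:TEXT_BLOCK_HARD_LIMIT]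
-- ===== Notes on version B (the rewrite author's own statement) =====
-- stated objective: faster
-- what changed: A re-renders and re-measures the whole joined text via recursive calls each time it pops one trailing item; B precomputes per-section prefix sums of line lengths once, finds the kept counts kR/kU/kF by three arithmetic countdown scans, and builds the string a single time.
import Mathlib
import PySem

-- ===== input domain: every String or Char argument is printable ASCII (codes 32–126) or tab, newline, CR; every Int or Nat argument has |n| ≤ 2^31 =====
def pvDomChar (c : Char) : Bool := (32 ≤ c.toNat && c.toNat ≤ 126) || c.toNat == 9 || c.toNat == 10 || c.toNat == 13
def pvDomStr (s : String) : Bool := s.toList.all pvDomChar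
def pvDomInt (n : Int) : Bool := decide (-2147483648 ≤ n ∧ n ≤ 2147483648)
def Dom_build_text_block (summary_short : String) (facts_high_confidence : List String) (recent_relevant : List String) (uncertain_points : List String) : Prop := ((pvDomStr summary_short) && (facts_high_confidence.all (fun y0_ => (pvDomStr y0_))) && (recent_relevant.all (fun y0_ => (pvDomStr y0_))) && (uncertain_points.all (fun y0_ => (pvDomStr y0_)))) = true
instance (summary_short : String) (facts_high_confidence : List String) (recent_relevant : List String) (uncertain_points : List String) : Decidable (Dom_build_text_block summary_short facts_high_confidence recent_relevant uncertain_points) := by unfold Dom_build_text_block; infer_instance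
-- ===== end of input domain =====

-- ===== PORT A =====
-- A (homegraph/context.py): pops trailing items one at a time, re-rendering the whole
-- block through recursive calls until it fits; the Nat fuel only makes the recursion total.
def pvLoopR (go : List String → List String → List String → String) :
    Nat → List String → List String → List String → String → List String × String
  | 0, _, R, _, text => (R, text)
  | m + 1, F, R, U, text =>
    if R ≠ [] ∧ 900 < PySem.Str.len text then
      pvLoopR go m F R.dropLast U (go F R.dropLast U)
    else (R, text)

def pvLoopU (go : List String → List String → List String → String) :
    Nat → List String → List String → List String → String → List String × String
  | 0, _, _, U, text => (U, text)
  | m + 1, F, R, U, text =>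
    if U ≠ [] ∧ 900 < PySem.Str.len text then
      pvLoopU go m F R U.dropLast (go F R U.dropLast)
    else (U, text)

def pvLoopF (go : List String → List String → List String → String) :
    Nat → List String → List String → List String → String → List String × String
  | 0, F, _, _, text => (F, text)
  | m + 1, F, R, U, text =>
    if 2 < F.length ∧ 900 < PySem.Str.len text then
      pvLoopF go m F.dropLast R U (go F.dropLast R U)
    else (F, text)

def pvGoA : Nat → String → List String → List String → List String → String
  | 0, _, _, _, _ => ""
  | n + 1, s, F, R, U =>
    let content0 : List String := if s ≠ "" ∧ s ≠ "aucun" then ["- " ++ s] else []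
    let content1 := F.foldl (fun acc it => acc ++ ["- " ++ it]) content0
    let content2 := R.foldl (fun acc it => acc ++ ["- " ++ it]) content1
    let content := U.foldl (fun acc it => acc ++ ["- incertain : " ++ it]) content2
    if content = [] then ""
    else
      let text := PySem.Str.join "\n" ("Contexte viewer:" :: content)
      if PySem.Str.len text ≤ 900 then text
      else
        let p1 := pvLoopR (pvGoA n s) n F R U text
        let p2 := pvLoopU (pvGoA n s) n F p1.1 U p1.2
        let p3 := pvLoopF (pvGoA n s) n F p1.1 p2.1 p2.2
        PySem.Str.slice p3.2 none (some 900)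

def build_text_block (summary_short : String) (facts_high_confidence : List String) (recent_relevant : List String) (uncertain_points : List String) : String :=
  pvGoA (facts_high_confidence.length + recent_relevant.length + uncertain_points.length + 1)
    summary_short facts_high_confidence recent_relevant uncertain_points

-- ===== PORT B =====
-- B: per-line length bookkeeping via prefix sums; three countdown scans pick the kept
-- counts, and the string is joined exactly once.
def pvHead (s : String) : List String :=
  if s ≠ "" ∧ s ≠ "aucun" then ["- " ++ s] else []

def pvBullets (xs : List String) : List String := xs.map (fun x => "- " ++ x)

def pvUncBullets (xs : List String) : List String := xs.map (fun x => "- incertain : " ++ x)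

def pvW (l : String) : Int := PySem.Str.len l + 1

def pvPresum (ws : List Int) : List Int := List.scanl (· + ·) 0 ws

def pvTrim (pre : List Int) (other : Int) (lo : Nat) : Nat → Nat
  | 0 => 0
  | k + 1 =>
    if lo < k + 1 ∧ 900 < other + pre.getD (k + 1) 0 then pvTrim pre other lo k
    else k + 1

def pvRender (lines : List String) : String :=
  PySem.Str.slice (PySem.Str.join "\n" ("Contexte viewer:" :: lines)) none (some 900)

def build_text_block_alt (summary_short : String) (facts_high_confidence : List String) (recent_relevant : List String) (uncertain_points : List String) : String :=
  let head := pvHead summary_short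
  let facts := pvBullets facts_high_confidence
  let recent := pvBullets recent_relevant
  let unc := pvUncBullets uncertain_points
  if head = [] ∧ facts = [] ∧ recent = [] ∧ unc = [] then ""
  else
    let base := 16 + (head.map pvW).sum
    let fpre := pvPresum (facts.map pvW)
    let rpre := pvPresum (recent.map pvW)
    let upre := pvPresum (unc.map pvW)
    let ks :=
      if 900 < base + fpre.getD facts.length 0 + rpre.getD recent.length 0 + upre.getD unc.length 0 then
        let kR := pvTrim rpre (base + fpre.getD facts.length 0 + upre.getD unc.length 0) 0 recent.length
        let kU := pvTrim upre (base + fpre.getD facts.length 0 + rpre.getD kR 0) 0 unc.length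
        let kF := pvTrim fpre (base + rpre.getD kR 0 + upre.getD kU 0) 2 facts.length
        (kR, kU, kF)
      else (recent.length, unc.length, facts.length)
    let lines := head ++ facts.take ks.2.2 ++ recent.take ks.1 ++ unc.take ks.2.1
    if lines = [] then "" else pvRender lines

-- ===== PRECONDITION & SPEC =====
def Spec_build_text_block (summary_short : String) (facts_high_confidence : List String) (recent_relevant : List String) (uncertain_points : List String) (out : String) : Prop := out = build_text_block_alt summary_short facts_high_confidence recent_relevant uncertain_points
instance (summary_short : String) (facts_high_confidence : List String) (recent_relevant : List String) (uncertain_points : List String) (out : String) : Decidable (Spec_build_text_block summary_short facts_high_confidence recent_relevant uncertain_points out) := by unfold Spec_build_text_block; infer_instance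

-- ===== CLAIM (what is proved, stated in full; the proofs are below) =====
def Claim_equal_build_text_block : Prop := ∀ (summary_short : String) (facts_high_confidence : List String) (recent_relevant : List String) (uncertain_points : List String), Dom_build_text_block summary_short facts_high_confidence recent_relevant uncertain_points → Spec_build_text_block summary_short facts_high_confidence recent_relevant uncertain_points (build_text_block summary_short facts_high_confidence recent_relevant uncertain_points)

-- ===== LEMMAS AND PROOFS =====

def pvLines (s : String) (F R U : List String) : List String :=
  pvHead s ++ pvBullets F ++ pvBullets R ++ pvUncBullets U

def pvText (s : String) (F R U : List String) : String :=
  PySem.Str.join "\n" ("Contexte viewer:" :: pvLines s F R U)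

-- the intermediate quantities of B, named for the proofs
def pvO1 (s : String) (F U : List String) : Int :=
  16 + ((pvHead s).map pvW).sum
    + (pvPresum ((pvBullets F).map pvW)).getD (pvBullets F).length 0
    + (pvPresum ((pvUncBullets U).map pvW)).getD (pvUncBullets U).length 0

def pvKR (s : String) (F R U : List String) : Nat :=
  pvTrim (pvPresum ((pvBullets R).map pvW)) (pvO1 s F U) 0 (pvBullets R).length

def pvO2 (s : String) (F R U : List String) : Int :=
  16 + ((pvHead s).map pvW).sum
    + (pvPresum ((pvBullets F).map pvW)).getD (pvBullets F).length 0
    + (pvPresum ((pvBullets R).map pvW)).getD (pvKR s F R U) 0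

def pvKU (s : String) (F R U : List String) : Nat :=
  pvTrim (pvPresum ((pvUncBullets U).map pvW)) (pvO2 s F R U) 0 (pvUncBullets U).length

def pvO3 (s : String) (F R U : List String) : Int :=
  16 + ((pvHead s).map pvW).sum
    + (pvPresum ((pvBullets R).map pvW)).getD (pvKR s F R U) 0
    + (pvPresum ((pvUncBullets U).map pvW)).getD (pvKU s F R U) 0

def pvKF (s : String) (F R U : List String) : Nat :=
  pvTrim (pvPresum ((pvBullets F).map pvW)) (pvO3 s F R U) 2 (pvBullets F).length

lemma pvContent_eq (s : String) (F R U : List String) :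
    U.foldl (fun acc it => acc ++ ["- incertain : " ++ it])
      (R.foldl (fun acc it => acc ++ ["- " ++ it])
        (F.foldl (fun acc it => acc ++ ["- " ++ it])
          (if s ≠ "" ∧ s ≠ "aucun" then ["- " ++ s] else []))) = pvLines s F R U := by
  rw [PySem.List.foldl_append_singleton_eq_map, PySem.List.foldl_append_singleton_eq_map,
    PySem.List.foldl_append_singleton_eq_map]
  simp [pvLines, pvHead, pvBullets, pvUncBullets, List.append_assoc]

lemma pvJoinLen (h : List Char) (ls : List (List Char)) :
    (PySem.Chars.join ['\n'] (h :: ls)).length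
      = h.length + (ls.map (fun l => 1 + l.length)).sum := by
  induction ls generalizing h with
  | nil => simp [PySem.Chars.join_singleton]
  | cons l rest ih =>
    rw [PySem.Chars.join_cons_cons]
    simp [ih l]
    omega

lemma pvSumW (ls : List String) :
    (ls.map pvW).sum = ((ls.map (fun t => 1 + t.toList.length)).sum : Nat) := by
  induction ls with
  | nil => simp
  | cons l rest ih =>
    simp [pvW, PySem.Str.len_eq, ih]
    ring

lemma pvLen_text (s : String) (F R U : List String) :
    PySem.Str.len (pvText s F R U) = 16 + ((pvLines s F R U).map pvW).sum := by
  rw [pvText, PySem.Str.len_eq, PySem.Str.toList_join]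
  have hsep : ("\n" : String).toList = ['\n'] := by decide
  rw [List.map_cons, hsep, pvJoinLen]
  have hhdr : ("Contexte viewer:" : String).toList.length = 16 := by decide
  rw [hhdr, pvSumW]
  rw [List.map_map]
  push_cast
  ring_nf
  rfl

lemma pvPresum_getD_aux (ws : List Int) (a : Int) (j : Nat) (hj : j ≤ ws.length) :
    (List.scanl (· + ·) a ws).getD j 0 = a + (ws.take j).sum := by
  induction ws generalizing a j with
  | nil =>
    simp only [List.length_nil, Nat.le_zero] at hj
    subst hj
    simp
  | cons w rest ih =>
    rw [List.scanl_cons]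
    cases j with
    | zero => simp
    | succ j =>
      simp only [List.getD_cons_succ, List.take_succ_cons, List.sum_cons]
      rw [ih (a + w) j (by simpa using hj)]
      ring

lemma pvPresum_getD (ws : List Int) (j : Nat) (hj : j ≤ ws.length) :
    (pvPresum ws).getD j 0 = (ws.take j).sum := by
  rw [pvPresum, pvPresum_getD_aux ws 0 j hj, zero_add]

lemma pvMapW_take_full (ls : List String) : (ls.map pvW).take ls.length = ls.map pvW := by
  apply List.take_of_length_le
  simp

lemma pvTotal_eq (s : String) (F R U : List String) :
    16 + ((pvHead s).map pvW).sum
      + (pvPresum ((pvBullets F).map pvW)).getD (pvBullets F).length 0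
      + (pvPresum ((pvBullets R).map pvW)).getD (pvBullets R).length 0
      + (pvPresum ((pvUncBullets U).map pvW)).getD (pvUncBullets U).length 0
    = PySem.Str.len (pvText s F R U) := by
  rw [pvPresum_getD _ _ (by simp), pvPresum_getD _ _ (by simp), pvPresum_getD _ _ (by simp)]
  rw [pvMapW_take_full, pvMapW_take_full, pvMapW_take_full]
  rw [pvLen_text, pvLines]
  simp [List.sum_append]
  ring

lemma pvTrim_noop (pre : List Int) (o : Int) (lo k : Nat)
    (h : ¬ (lo < k ∧ 900 < o + pre.getD k 0)) : pvTrim pre o lo k = k := by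
  cases k with
  | zero => rfl
  | succ k => rw [pvTrim, if_neg h]

lemma pvTrim_step (pre : List Int) (o : Int) (lo k : Nat)
    (h1 : lo < k) (h2 : 900 < o + pre.getD k 0) :
    pvTrim pre o lo k = pvTrim pre o lo (k - 1) := by
  cases k with
  | zero => omega
  | succ k => rw [pvTrim, if_pos ⟨h1, h2⟩]; rfl

lemma pvTrim_le (pre : List Int) (o : Int) (lo k : Nat) : pvTrim pre o lo k ≤ k := by
  induction k with
  | zero => exact le_refl 0
  | succ k ih =>
    rw [pvTrim]
    split
    · exact le_trans ih (by omega)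
    · exact le_refl (k + 1)

lemma pvTrim_congr (pre pre' : List Int) (o : Int) (lo k : Nat)
    (h : ∀ j, j ≤ k → pre.getD j 0 = pre'.getD j 0) :
    pvTrim pre o lo k = pvTrim pre' o lo k := by
  induction k with
  | zero => rfl
  | succ k ih =>
    rw [pvTrim, pvTrim, h (k + 1) le_rfl]
    split
    · exact ih (fun j hj => h j (by omega))
    · rfl

lemma pvTake_dropLast {α : Type} (xs : List α) (j : Nat) (hj : j + 1 ≤ xs.length) :
    xs.dropLast.take j = xs.take j := by
  rw [List.dropLast_eq_take, List.take_take]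
  congr 1
  omega

lemma pvStrEq_of_toList {s t : String} (h : s.toList = t.toList) : s = t := by
  rw [← String.ofList_toList (s := s), h, String.ofList_toList]

lemma pvSlice900_noop (t : String) (h : PySem.Str.len t ≤ 900) :
    PySem.Str.slice t none (some 900) = t := by
  apply pvStrEq_of_toList
  rw [PySem.Str.toList_slice, PySem.Chars.slice_eq_listSlice,
    PySem.List.slice_to _ (by norm_num)]
  apply List.take_of_length_le
  rw [PySem.Str.len_eq] at h
  omega

lemma pvRender_len (lines : List String) : PySem.Str.len (pvRender lines) ≤ 900 := by
  rw [pvRender, PySem.Str.len_eq, PySem.Str.toList_slice, PySem.Chars.slice_eq_listSlice,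
    PySem.List.slice_to _ (by norm_num)]
  have := List.length_take_le (900 : Int).toNat
    (PySem.Str.join "\n" ("Contexte viewer:" :: lines)).toList
  omega

-- characterization of B in the over-limit case
lemma pvB_over_char (s : String) (F R U : List String)
    (hover : 900 < PySem.Str.len (pvText s F R U)) :
    build_text_block_alt s F R U =
      (let lines := pvHead s ++ (pvBullets F).take (pvKF s F R U)
          ++ (pvBullets R).take (pvKR s F R U) ++ (pvUncBullets U).take (pvKU s F R U);
       if lines = [] then "" else pvRender lines) := by
  have hne : ¬ (pvHead s = [] ∧ pvBullets F = [] ∧ pvBullets R = [] ∧ pvUncBullets U = []) := by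
    rintro ⟨h1, h2, h3, h4⟩
    rw [pvLen_text, pvLines, h1, h2, h3, h4] at hover
    simp at hover
  have hc : 900 < 16 + ((pvHead s).map pvW).sum
      + (pvPresum ((pvBullets F).map pvW)).getD (pvBullets F).length 0
      + (pvPresum ((pvBullets R).map pvW)).getD (pvBullets R).length 0
      + (pvPresum ((pvUncBullets U).map pvW)).getD (pvUncBullets U).length 0 := by
    rw [pvTotal_eq]; exact hover
  simp only [build_text_block_alt]
  rw [if_neg hne, if_pos hc]
  simp only [pvKF, pvKR, pvKU, pvO1, pvO2, pvO3]

-- characterization of B in the fits case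
lemma pvB_fits_char (s : String) (F R U : List String)
    (hfits : PySem.Str.len (pvText s F R U) ≤ 900) :
    build_text_block_alt s F R U =
      (if pvLines s F R U = [] then "" else pvRender (pvLines s F R U)) := by
  by_cases hall : pvHead s = [] ∧ pvBullets F = [] ∧ pvBullets R = [] ∧ pvUncBullets U = []
  · obtain ⟨h1, h2, h3, h4⟩ := hall
    simp only [build_text_block_alt]
    rw [if_pos ⟨h1, h2, h3, h4⟩]
    rw [pvLines, h1, h2, h3, h4]
    simp
  · have hc : ¬ (900 < 16 + ((pvHead s).map pvW).sum
        + (pvPresum ((pvBullets F).map pvW)).getD (pvBullets F).length 0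
        + (pvPresum ((pvBullets R).map pvW)).getD (pvBullets R).length 0
        + (pvPresum ((pvUncBullets U).map pvW)).getD (pvUncBullets U).length 0) := by
      rw [pvTotal_eq]; omega
    simp only [build_text_block_alt]
    rw [if_neg hall, if_neg hc]
    simp only [List.take_length, pvLines]

lemma pvB_empty (s : String) (F R U : List String) (h : pvLines s F R U = []) :
    build_text_block_alt s F R U = "" := by
  have h16 : PySem.Str.len (pvText s F R U) ≤ 900 := by
    rw [pvLen_text, h]; simp
  rw [pvB_fits_char s F R U h16, if_pos h]

lemma pvB_fits (s : String) (F R U : List String) (hne : pvLines s F R U ≠ [])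
    (hle : PySem.Str.len (pvText s F R U) ≤ 900) :
    build_text_block_alt s F R U = pvText s F R U := by
  rw [pvB_fits_char s F R U hle, if_neg hne]
  rw [pvRender, ← pvText, pvSlice900_noop _ hle]

lemma pvB_len (s : String) (F R U : List String) :
    PySem.Str.len (build_text_block_alt s F R U) ≤ 900 := by
  by_cases hover : 900 < PySem.Str.len (pvText s F R U)
  · rw [pvB_over_char s F R U hover]
    simp only []
    split
    · simp [PySem.Str.len_eq]
    · exact pvRender_len _
  · rw [pvB_fits_char s F R U (by omega)]
    split
    · simp [PySem.Str.len_eq]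
    · exact pvRender_len _

-- prefix sums of a dropLast agree below the removed entry
lemma pvPre_drop_agree (ls : List String) (j : Nat) (hj : j + 1 ≤ ls.length) :
    (pvPresum ((ls.dropLast).map pvW)).getD j 0 = (pvPresum (ls.map pvW)).getD j 0 := by
  rw [pvPresum_getD _ _ (by simp; omega), pvPresum_getD _ _ (by simp; omega)]
  rw [List.map_dropLast, pvTake_dropLast _ _ (by simp; omega)]

lemma pvBullets_dropLast (R : List String) :
    pvBullets R.dropLast = (pvBullets R).dropLast := by
  simp [pvBullets, List.map_dropLast]

lemma pvUncBullets_dropLast (U : List String) :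
    pvUncBullets U.dropLast = (pvUncBullets U).dropLast := by
  simp [pvUncBullets, List.map_dropLast]

lemma pvTotR (s : String) (F R U : List String) :
    pvO1 s F U + (pvPresum ((pvBullets R).map pvW)).getD (pvBullets R).length 0
      = PySem.Str.len (pvText s F R U) := by
  rw [pvO1, ← pvTotal_eq s F R U]
  try ring

lemma pvTotU (s : String) (F R U : List String)
    (hkR : pvKR s F R U = (pvBullets R).length) :
    pvO2 s F R U + (pvPresum ((pvUncBullets U).map pvW)).getD (pvUncBullets U).length 0
      = PySem.Str.len (pvText s F R U) := by
  rw [pvO2, hkR, ← pvTotal_eq s F R U]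
  try ring

lemma pvTotF (s : String) (F R U : List String)
    (hkR : pvKR s F R U = (pvBullets R).length)
    (hkU : pvKU s F R U = (pvUncBullets U).length) :
    pvO3 s F R U + (pvPresum ((pvBullets F).map pvW)).getD (pvBullets F).length 0
      = PySem.Str.len (pvText s F R U) := by
  rw [pvO3, hkR, hkU, ← pvTotal_eq s F R U]
  try ring

lemma pvKR_full (s : String) (F R U : List String)
    (hfits : PySem.Str.len (pvText s F R U) ≤ 900) :
    pvKR s F R U = (pvBullets R).length := by
  rw [pvKR]
  exact pvTrim_noop _ _ _ _ (by intro hc; have := pvTotR s F R U; omega)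

lemma pvKU_full (s : String) (F R U : List String)
    (hfits : PySem.Str.len (pvText s F R U) ≤ 900) :
    pvKU s F R U = (pvUncBullets U).length := by
  rw [pvKU]
  exact pvTrim_noop _ _ _ _ (by
    intro hc; have := pvTotU s F R U (pvKR_full s F R U hfits); omega)

lemma pvKF_full (s : String) (F R U : List String)
    (hfits : PySem.Str.len (pvText s F R U) ≤ 900) :
    pvKF s F R U = (pvBullets F).length := by
  rw [pvKF]
  exact pvTrim_noop _ _ _ _ (by
    intro hc
    have := pvTotF s F R U (pvKR_full s F R U hfits) (pvKU_full s F R U hfits)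
    omega)

lemma pvKR_nil (s : String) (F U : List String) :
    pvKR s F [] U = (pvBullets ([] : List String)).length := by
  rw [pvKR]
  exact pvTrim_noop _ _ _ _ (by simp [pvBullets])

lemma pvKU_nil (s : String) (F R : List String) :
    pvKU s F R [] = (pvUncBullets ([] : List String)).length := by
  rw [pvKU]
  exact pvTrim_noop _ _ _ _ (by simp [pvUncBullets])

-- === the R-popping step of B ===
lemma pvKR_dropR (s : String) (F R U : List String) (hR : R ≠ [])
    (hover : 900 < PySem.Str.len (pvText s F R U)) :
    pvKR s F R U = pvKR s F R.dropLast U := by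
  have hpos : 0 < (pvBullets R).length := by
    simpa [pvBullets] using List.length_pos_of_ne_nil hR
  rw [pvKR, pvKR, pvBullets_dropLast]
  rw [pvTrim_step _ _ _ _ hpos (by have := pvTotR s F R U; omega)]
  rw [List.length_dropLast]
  exact pvTrim_congr _ _ _ _ _
    (fun j hj => (pvPre_drop_agree (pvBullets R) j (by omega)).symm)

lemma pvKR_dropR_le (s : String) (F R U : List String) :
    pvKR s F R.dropLast U ≤ (pvBullets R).length - 1 := by
  rw [pvKR, pvBullets_dropLast]
  have := pvTrim_le (pvPresum (((pvBullets R).dropLast).map pvW)) (pvO1 s F U) 0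
    ((pvBullets R).dropLast).length
  exact le_trans this (by simp [List.length_dropLast])

lemma pv_rAt_dropR (s : String) (F R U : List String) (hR : R ≠ [])
    (hover : 900 < PySem.Str.len (pvText s F R U)) :
    (pvPresum ((pvBullets R).map pvW)).getD (pvKR s F R U) 0
      = (pvPresum ((pvBullets R.dropLast).map pvW)).getD (pvKR s F R.dropLast U) 0 := by
  have hpos : 0 < (pvBullets R).length := by
    simpa [pvBullets] using List.length_pos_of_ne_nil hR
  have hle := pvKR_dropR_le s F R U
  rw [pvKR_dropR s F R U hR hover, pvBullets_dropLast]
  exact (pvPre_drop_agree (pvBullets R) _ (by omega)).symm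

lemma pvO2_dropR (s : String) (F R U : List String) (hR : R ≠ [])
    (hover : 900 < PySem.Str.len (pvText s F R U)) :
    pvO2 s F R U = pvO2 s F R.dropLast U := by
  rw [pvO2, pvO2, pv_rAt_dropR s F R U hR hover]

lemma pvKU_dropR (s : String) (F R U : List String) (hR : R ≠ [])
    (hover : 900 < PySem.Str.len (pvText s F R U)) :
    pvKU s F R U = pvKU s F R.dropLast U := by
  rw [pvKU, pvKU, pvO2_dropR s F R U hR hover]

lemma pvO3_dropR (s : String) (F R U : List String) (hR : R ≠ [])
    (hover : 900 < PySem.Str.len (pvText s F R U)) :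
    pvO3 s F R U = pvO3 s F R.dropLast U := by
  rw [pvO3, pvO3, pv_rAt_dropR s F R U hR hover, pvKU_dropR s F R U hR hover]

lemma pvKF_dropR (s : String) (F R U : List String) (hR : R ≠ [])
    (hover : 900 < PySem.Str.len (pvText s F R U)) :
    pvKF s F R U = pvKF s F R.dropLast U := by
  rw [pvKF, pvKF, pvO3_dropR s F R U hR hover]

lemma pvB_dropR (s : String) (F R U : List String) (hR : R ≠ [])
    (hover : 900 < PySem.Str.len (pvText s F R U)) :
    build_text_block_alt s F R U = build_text_block_alt s F R.dropLast U := by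
  have hpos : 0 < (pvBullets R).length := by
    simpa [pvBullets] using List.length_pos_of_ne_nil hR
  have hle := pvKR_dropR_le s F R U
  by_cases hov' : 900 < PySem.Str.len (pvText s F R.dropLast U)
  · rw [pvB_over_char s F R U hover, pvB_over_char s F R.dropLast U hov']
    dsimp only
    rw [pvKR_dropR s F R U hR hover, pvKU_dropR s F R U hR hover,
      pvKF_dropR s F R U hR hover, pvBullets_dropLast,
      pvTake_dropLast (pvBullets R) _ (by omega)]
  · have hfits' : PySem.Str.len (pvText s F R.dropLast U) ≤ 900 := by omega
    rw [pvB_over_char s F R U hover, pvB_fits_char s F R.dropLast U hfits']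
    dsimp only
    have h1 : pvKR s F R U = (pvBullets R.dropLast).length := by
      rw [pvKR_dropR s F R U hR hover]; exact pvKR_full s F R.dropLast U hfits'
    have h2 : pvKU s F R U = (pvUncBullets U).length := by
      rw [pvKU_dropR s F R U hR hover]; exact pvKU_full s F R.dropLast U hfits'
    have h3 : pvKF s F R U = (pvBullets F).length := by
      rw [pvKF_dropR s F R U hR hover]; exact pvKF_full s F R.dropLast U hfits'
    have h4 : (pvBullets R).take ((pvBullets R.dropLast).length) = pvBullets R.dropLast := by
      rw [pvBullets_dropLast, List.length_dropLast]
      exact (List.dropLast_eq_take).symm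
    rw [h1, h2, h3, List.take_length, List.take_length, h4, pvLines, pvBullets_dropLast]

-- === the U-popping step of B (recent already empty) ===
lemma pvKU_dropU (s : String) (F U : List String) (hU : U ≠ [])
    (hover : 900 < PySem.Str.len (pvText s F [] U)) :
    pvKU s F [] U = pvKU s F [] U.dropLast := by
  have hpos : 0 < (pvUncBullets U).length := by
    simpa [pvUncBullets] using List.length_pos_of_ne_nil hU
  have hO2 : pvO2 s F [] U = pvO2 s F [] U.dropLast := by
    rw [pvO2, pvO2, pvKR_nil, pvKR_nil]
  rw [pvKU, pvKU, pvUncBullets_dropLast, ← hO2]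
  rw [pvTrim_step _ _ _ _ hpos (by have := pvTotU s F [] U (pvKR_nil s F U); omega)]
  rw [List.length_dropLast]
  exact pvTrim_congr _ _ _ _ _
    (fun j hj => (pvPre_drop_agree (pvUncBullets U) j (by omega)).symm)

lemma pvKU_dropU_le (s : String) (F U : List String) :
    pvKU s F [] U.dropLast ≤ (pvUncBullets U).length - 1 := by
  rw [pvKU, pvUncBullets_dropLast]
  have := pvTrim_le (pvPresum (((pvUncBullets U).dropLast).map pvW)) (pvO2 s F [] U.dropLast) 0
    ((pvUncBullets U).dropLast).length
  exact le_trans this (by simp [List.length_dropLast])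

lemma pv_uAt_dropU (s : String) (F U : List String) (hU : U ≠ [])
    (hover : 900 < PySem.Str.len (pvText s F [] U)) :
    (pvPresum ((pvUncBullets U).map pvW)).getD (pvKU s F [] U) 0
      = (pvPresum ((pvUncBullets U.dropLast).map pvW)).getD (pvKU s F [] U.dropLast) 0 := by
  have hpos : 0 < (pvUncBullets U).length := by
    simpa [pvUncBullets] using List.length_pos_of_ne_nil hU
  have hle := pvKU_dropU_le s F U
  rw [pvKU_dropU s F U hU hover, pvUncBullets_dropLast]
  exact (pvPre_drop_agree (pvUncBullets U) _ (by omega)).symm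

lemma pvKF_dropU (s : String) (F U : List String) (hU : U ≠ [])
    (hover : 900 < PySem.Str.len (pvText s F [] U)) :
    pvKF s F [] U = pvKF s F [] U.dropLast := by
  have hO3 : pvO3 s F [] U = pvO3 s F [] U.dropLast := by
    rw [pvO3, pvO3, pvKR_nil, pvKR_nil, pv_uAt_dropU s F U hU hover]
  rw [pvKF, pvKF, hO3]

lemma pvB_dropU (s : String) (F U : List String) (hU : U ≠ [])
    (hover : 900 < PySem.Str.len (pvText s F [] U)) :
    build_text_block_alt s F [] U = build_text_block_alt s F [] U.dropLast := by
  have hpos : 0 < (pvUncBullets U).length := by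
    simpa [pvUncBullets] using List.length_pos_of_ne_nil hU
  have hle := pvKU_dropU_le s F U
  by_cases hov' : 900 < PySem.Str.len (pvText s F [] U.dropLast)
  · rw [pvB_over_char s F [] U hover, pvB_over_char s F [] U.dropLast hov']
    dsimp only
    rw [pvKR_nil, pvKR_nil, pvKU_dropU s F U hU hover, pvKF_dropU s F U hU hover,
      pvUncBullets_dropLast, pvTake_dropLast (pvUncBullets U) _ (by omega)]
  · have hfits' : PySem.Str.len (pvText s F [] U.dropLast) ≤ 900 := by omega
    rw [pvB_over_char s F [] U hover, pvB_fits_char s F [] U.dropLast hfits']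
    dsimp only
    have h1 : pvKU s F [] U = (pvUncBullets U.dropLast).length := by
      rw [pvKU_dropU s F U hU hover]; exact pvKU_full s F [] U.dropLast hfits'
    have h3 : pvKF s F [] U = (pvBullets F).length := by
      rw [pvKF_dropU s F U hU hover]; exact pvKF_full s F [] U.dropLast hfits'
    have h2 : pvKR s F [] U = pvKR s F [] U.dropLast := by rw [pvKR_nil, pvKR_nil]
    have h4 : (pvUncBullets U).take ((pvUncBullets U.dropLast).length) = pvUncBullets U.dropLast := by
      rw [pvUncBullets_dropLast, List.length_dropLast]
      exact (List.dropLast_eq_take).symm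
    rw [h1, h2, h3, List.take_length, h4, pvLines, pvKR_nil, List.take_length,
      pvUncBullets_dropLast]

-- === the F-popping step of B (recent and uncertain already empty) ===
lemma pvO3_nil_nil (s : String) (F F' : List String) :
    pvO3 s F [] [] = pvO3 s F' [] [] := by
  rw [pvO3, pvO3, pvKR_nil, pvKR_nil, pvKU_nil, pvKU_nil]

lemma pvKF_dropF (s : String) (F : List String) (hF : 2 < F.length)
    (hover : 900 < PySem.Str.len (pvText s F [] [])) :
    pvKF s F [] [] = pvKF s F.dropLast [] [] := by
  have hpos : 2 < (pvBullets F).length := by simpa [pvBullets] using hF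
  rw [pvKF, pvKF, pvBullets_dropLast, ← pvO3_nil_nil s F F.dropLast]
  rw [pvTrim_step _ _ _ _ hpos (by
    have := pvTotF s F [] [] (pvKR_nil s F []) (pvKU_nil s F []); omega)]
  rw [List.length_dropLast]
  exact pvTrim_congr _ _ _ _ _
    (fun j hj => (pvPre_drop_agree (pvBullets F) j (by omega)).symm)

lemma pvKF_dropF_le (s : String) (F : List String) :
    pvKF s F.dropLast [] [] ≤ (pvBullets F).length - 1 := by
  rw [pvKF, pvBullets_dropLast]
  have := pvTrim_le (pvPresum (((pvBullets F).dropLast).map pvW)) (pvO3 s F.dropLast [] []) 2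
    ((pvBullets F).dropLast).length
  exact le_trans this (by simp [List.length_dropLast])

lemma pvB_dropF (s : String) (F : List String) (hF : 2 < F.length)
    (hover : 900 < PySem.Str.len (pvText s F [] [])) :
    build_text_block_alt s F [] [] = build_text_block_alt s F.dropLast [] [] := by
  have hpos : 2 < (pvBullets F).length := by simpa [pvBullets] using hF
  have hle := pvKF_dropF_le s F
  by_cases hov' : 900 < PySem.Str.len (pvText s F.dropLast [] [])
  · rw [pvB_over_char s F [] [] hover, pvB_over_char s F.dropLast [] [] hov']
    dsimp only
    rw [pvKR_nil, pvKR_nil, pvKU_nil, pvKU_nil, pvKF_dropF s F hF hover,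
      pvBullets_dropLast, pvTake_dropLast (pvBullets F) _ (by omega)]
  · have hfits' : PySem.Str.len (pvText s F.dropLast [] []) ≤ 900 := by omega
    rw [pvB_over_char s F [] [] hover, pvB_fits_char s F.dropLast [] [] hfits']
    dsimp only
    have h3 : pvKF s F [] [] = (pvBullets F.dropLast).length := by
      rw [pvKF_dropF s F hF hover]; exact pvKF_full s F.dropLast [] [] hfits'
    have h4 : (pvBullets F).take ((pvBullets F.dropLast).length) = pvBullets F.dropLast := by
      rw [pvBullets_dropLast, List.length_dropLast]
      exact (List.dropLast_eq_take).symm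
    rw [h3, h4, pvKR_nil, pvKU_nil, List.take_length, List.take_length, pvLines]

lemma pvB_stuck (s : String) (F : List String) (hF : F.length ≤ 2)
    (hover : 900 < PySem.Str.len (pvText s F [] [])) :
    build_text_block_alt s F [] []
      = PySem.Str.slice (pvText s F [] []) none (some 900) := by
  rw [pvB_over_char s F [] [] hover]
  dsimp only
  have hkF : pvKF s F [] [] = (pvBullets F).length := by
    rw [pvKF]
    exact pvTrim_noop _ _ _ _ (by
      intro hc
      have : (pvBullets F).length ≤ 2 := by simpa [pvBullets] using hF
      omega)
  rw [hkF, pvKR_nil, pvKU_nil, List.take_length, List.take_length, List.take_length]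
  have hne : pvHead s ++ pvBullets F ++ pvBullets [] ++ pvUncBullets [] ≠ [] := by
    intro h0
    apply absurd hover
    rw [pvLen_text, pvLines, h0]
    simp
  rw [if_neg hne, pvRender, pvText, pvLines]

lemma pvLoopR_exit (go : List String → List String → List String → String) (n : Nat)
    (F R U : List String) (text : String)
    (h : ¬ (R ≠ [] ∧ 900 < PySem.Str.len text)) :
    pvLoopR go n F R U text = (R, text) := by
  cases n with
  | zero => rfl
  | succ m => rw [pvLoopR, if_neg h]

lemma pvLoopU_exit (go : List String → List String → List String → String) (n : Nat)
    (F R U : List String) (text : String)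
    (h : ¬ (U ≠ [] ∧ 900 < PySem.Str.len text)) :
    pvLoopU go n F R U text = (U, text) := by
  cases n with
  | zero => rfl
  | succ m => rw [pvLoopU, if_neg h]

lemma pvLoopF_exit (go : List String → List String → List String → String) (n : Nat)
    (F R U : List String) (text : String)
    (h : ¬ (2 < F.length ∧ 900 < PySem.Str.len text)) :
    pvLoopF go n F R U text = (F, text) := by
  cases n with
  | zero => rfl
  | succ m => rw [pvLoopF, if_neg h]

lemma pvMain (fuel : Nat) (s : String) (F R U : List String)
    (hfuel : F.length + R.length + U.length < fuel) :
    pvGoA fuel s F R U = build_text_block_alt s F R U := by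
  induction fuel generalizing F R U with
  | zero => omega
  | succ n ih =>
    rw [pvGoA]
    simp only [pvContent_eq]
    by_cases hnil : pvLines s F R U = []
    · rw [if_pos hnil, pvB_empty s F R U hnil]
    · rw [if_neg hnil, ← pvText]
      by_cases hfits : PySem.Str.len (pvText s F R U) ≤ 900
      · rw [if_pos hfits, pvB_fits s F R U hnil hfits]
      · rw [if_neg hfits]
        have hover : 900 < PySem.Str.len (pvText s F R U) := by omega
        by_cases hR : R ≠ []
        · -- pop one recent item; the recursive call already fits
          have hszR : 0 < R.length := List.length_pos_of_ne_nil hR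
          obtain ⟨m, rfl⟩ : ∃ m, n = m + 1 := ⟨n - 1, by omega⟩
          have hrec : pvGoA (m + 1) s F R.dropLast U = build_text_block_alt s F R.dropLast U :=
            ih F R.dropLast U (by simp only [List.length_dropLast]; omega)
          have hlen := pvB_len s F R.dropLast U
          have hp1 : pvLoopR (pvGoA (m + 1) s) (m + 1) F R U (pvText s F R U)
              = (R.dropLast, build_text_block_alt s F R.dropLast U) := by
            rw [pvLoopR, if_pos ⟨hR, hover⟩, hrec]
            exact pvLoopR_exit _ m F R.dropLast U _ (fun hh => absurd hh.2 (by omega))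
          rw [hp1]
          dsimp only
          rw [pvLoopU_exit _ (m + 1) F R.dropLast U _ (fun hh => absurd hh.2 (by omega))]
          dsimp only
          rw [pvLoopF_exit _ (m + 1) F R.dropLast U _ (fun hh => absurd hh.2 (by omega))]
          dsimp only
          rw [pvSlice900_noop _ hlen]
          exact (pvB_dropR s F R U hR hover).symm
        · rw [ne_eq, not_not] at hR
          subst hR
          rw [pvLoopR_exit _ n F [] U _ (fun hh => absurd rfl hh.1)]
          dsimp only
          by_cases hU : U ≠ []
          · have hszU : 0 < U.length := List.length_pos_of_ne_nil hU
            obtain ⟨m, rfl⟩ : ∃ m, n = m + 1 := ⟨n - 1, by omega⟩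
            have hrec : pvGoA (m + 1) s F [] U.dropLast = build_text_block_alt s F [] U.dropLast :=
              ih F [] U.dropLast (by simp only [List.length_dropLast]; omega)
            have hlen := pvB_len s F [] U.dropLast
            have hp2 : pvLoopU (pvGoA (m + 1) s) (m + 1) F [] U (pvText s F [] U)
                = (U.dropLast, build_text_block_alt s F [] U.dropLast) := by
              rw [pvLoopU, if_pos ⟨hU, hover⟩, hrec]
              exact pvLoopU_exit _ m F [] U.dropLast _ (fun hh => absurd hh.2 (by omega))
            rw [hp2]
            dsimp only
            rw [pvLoopF_exit _ (m + 1) F [] U.dropLast _ (fun hh => absurd hh.2 (by omega))]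
            dsimp only
            rw [pvSlice900_noop _ hlen]
            exact (pvB_dropU s F U hU hover).symm
          · rw [ne_eq, not_not] at hU
            subst hU
            rw [pvLoopU_exit _ n F [] [] _ (fun hh => absurd rfl hh.1)]
            dsimp only
            by_cases hF : 2 < F.length
            · obtain ⟨m, rfl⟩ : ∃ m, n = m + 1 := ⟨n - 1, by omega⟩
              have hrec : pvGoA (m + 1) s F.dropLast [] [] = build_text_block_alt s F.dropLast [] [] :=
                ih F.dropLast [] [] (by simp only [List.length_dropLast]; omega)
              have hlen := pvB_len s F.dropLast [] []
              have hp3 : pvLoopF (pvGoA (m + 1) s) (m + 1) F [] [] (pvText s F [] [])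
                  = (F.dropLast, build_text_block_alt s F.dropLast [] []) := by
                rw [pvLoopF, if_pos ⟨hF, hover⟩, hrec]
                exact pvLoopF_exit _ m F.dropLast [] [] _ (fun hh => absurd hh.2 (by omega))
              rw [hp3]
              dsimp only
              rw [pvSlice900_noop _ hlen]
              exact (pvB_dropF s F hF hover).symm
            · rw [pvLoopF_exit _ n F [] [] _ (fun hh => absurd hh.1 hF)]
              dsimp only
              exact (pvB_stuck s F (by omega) hover).symm

-- ===== VERDICT (by name: the statement is the Claim_ definition above) =====
theorem build_text_block_spec : Claim_equal_build_text_block := by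
  intro s F R U _
  unfold Spec_build_text_block build_text_block
  exact pvMain _ s F R U (by omega)
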